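-- pv_equiv track=rewrite | github.com/jyc0011/backjoon | 백준/Gold/21315. 카드 섞기/카드 섞기.py | calc
-- ===== SOURCE A (Python) =====
-- def calc(card, k, n):
--     card = card[:]
--     top = 2 ** k
--     card = card[-top:] + card[:-top]
--     for i in range(2, k + 2):
--         move = 2 ** (k - i + 1)
--         top_block = card[:top]
--         rest = card[top:]
--         card = top_block[-move:] + top_block[:-move] + rest
--         top = move
--
--     return card
-- ===== SOURCE B (Python) =====
-- def _arrange(c, top):
--     # Divide and conquer: rotate the front block of size `top` by half, then
--     # recurse on the half-size front block.
--     if top < 2: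
--         return c
--     move = top // 2
--     block = c[:top]
--     return _arrange(block[-move:] + block[:-move] + c[top:], move)
--
--
-- def calc(card, k, n):
--     top = 2 ** k
--     card = card[-top:] + card[:-top]
--     L = len(card)
--     if L:
--         # Block rotations whose shift is >= len(card) are identities, so start
--         # the recursion at the largest power of two below 2 * len(card).
--         top = 2 ** min(k, (2 * L - 1).bit_length() - 1)
--     return _arrange(card, top)
-- ===== Notes on version B (the rewrite author's own statement) =====
-- stated objective: faster
-- what changed: The power-indexed for-loop over i in range(2, k+2) is replaced by a divide-and-conquer recursion that halves the front block, and the recursion starts at the largest power of two below 2*len(card) instead of 2**k, skipping all block rotations whose shift is >= len(card) (which are identities).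
-- outside the precondition, e.g. on calc([1, 2], -1, 2): A raises TypeError, B raises TypeError
import Mathlib
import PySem

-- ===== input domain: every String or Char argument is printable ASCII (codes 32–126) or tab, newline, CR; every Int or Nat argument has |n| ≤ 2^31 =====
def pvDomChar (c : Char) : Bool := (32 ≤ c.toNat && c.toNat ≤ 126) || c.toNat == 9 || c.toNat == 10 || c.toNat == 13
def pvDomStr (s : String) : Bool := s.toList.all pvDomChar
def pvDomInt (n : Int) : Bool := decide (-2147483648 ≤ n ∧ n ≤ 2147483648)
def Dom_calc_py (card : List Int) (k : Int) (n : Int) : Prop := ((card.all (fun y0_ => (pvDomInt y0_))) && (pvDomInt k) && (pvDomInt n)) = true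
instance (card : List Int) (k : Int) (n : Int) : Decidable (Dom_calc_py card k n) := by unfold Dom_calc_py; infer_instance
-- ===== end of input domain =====

-- B replaces A's power-indexed loop by a halving recursion on the front block and starts
-- it below 2*len(card), skipping the block rotations that are identities.

-- ===== PORT A =====
-- loop body of A's 'for i in range(2, k+2)': state is (card, top)
def stepA (k : Int) (st : List Int × Int) (i : Int) : List Int × Int :=
  let move : Int := (2 : Int) ^ (k - i + 1).toNat
  let top_block := PySem.List.slice st.1 none (some st.2)
  let rest := PySem.List.slice st.1 (some st.2) none
  (PySem.List.slice top_block (some (-move)) none ++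
     PySem.List.slice top_block none (some (-move)) ++ rest, move)

def calc_py (card : List Int) (k : Int) (n : Int) : List Int :=
  let top : Int := (2 : Int) ^ k.toNat
  let card := PySem.List.slice card (some (-top)) none ++ PySem.List.slice card none (some (-top))
  ((PySem.List.pyRange 2 (k + 2) 1).foldl (stepA k) (card, top)).1

-- ===== PORT B =====
-- termination fact for the halving recursion (cited by decreasing_by)
theorem pvHalfLt (t : Int) (h : ¬ t < 2) : (PySem.Int.floordiv t 2).toNat < t.toNat := by
  rw [PySem.Int.floordiv_eq_ediv_of_pos (by omega)]
  omega

def arrangeAlt (c : List Int) (top : Int) : List Int :=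
  if top < 2 then c
  else
    let move := PySem.Int.floordiv top 2
    let block := PySem.List.slice c none (some top)
    arrangeAlt (PySem.List.slice block (some (-move)) none ++
        PySem.List.slice block none (some (-move)) ++
        PySem.List.slice c (some top) none) move
termination_by top.toNat
decreasing_by exact pvHalfLt top (by assumption)

def calc_py_alt (card : List Int) (k : Int) (n : Int) : List Int :=
  let top : Int := (2 : Int) ^ k.toNat
  let card := PySem.List.slice card (some (-top)) none ++ PySem.List.slice card none (some (-top))
  let L : Int := (card.length : Int)
  let top := if L ≠ 0 then (2 : Int) ^ (min k ((PySem.Int.bitLength (2 * L - 1) : Int) - 1)).toNat else top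
  arrangeAlt card top

-- ===== PRECONDITION & SPEC =====
-- Pre_ excludes k < 0, where Python's 2 ** k is a float and A raises TypeError on the slice.
def Pre_calc_py (card : List Int) (k : Int) (n : Int) : Prop := 0 ≤ k
instance (card : List Int) (k : Int) (n : Int) : Decidable (Pre_calc_py card k n) := by unfold Pre_calc_py; infer_instance
def pvWitness_calc_py : List Int × Int × Int := ([1, 2, 3, 4], 2, 4)

def Spec_calc_py (card : List Int) (k : Int) (n : Int) (out : List Int) : Prop := out = calc_py_alt card k n
instance (card : List Int) (k : Int) (n : Int) (out : List Int) : Decidable (Spec_calc_py card k n out) := by unfold Spec_calc_py; infer_instance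

-- ===== CLAIM (what is proved, stated in full; the proofs are below) =====
def Claim_equal_calc_py : Prop := ∀ (card : List Int) (k : Int) (n : Int), Dom_calc_py card k n → Pre_calc_py card k n → Spec_calc_py card k n (calc_py card k n)

-- ===== LEMMAS AND PROOFS =====

theorem rot_id (c : List Int) (m : Int) (h : (c.length : Int) ≤ m) :
    PySem.List.slice c (some (-m)) none ++ PySem.List.slice c none (some (-m)) = c := by
  have hq : (if 0 < m then if (c.length : Int) < m then 0 else ((c.length : Int) + -m).toNat
      else min (-m).toNat c.length) = 0 := by split_ifs <;> omega
  simp [PySem.List.slice, PySem.List.clampIdx, hq]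

theorem take_all_slice (c : List Int) (b : Int) (h : (c.length : Int) ≤ b) :
    PySem.List.slice c none (some b) = c := by
  rw [PySem.List.slice_to c (b := b) (by omega)]
  exact List.take_of_length_le (by omega)

theorem drop_all_slice (c : List Int) (a : Int) (h : (c.length : Int) ≤ a) :
    PySem.List.slice c (some a) none = [] := by
  rw [PySem.List.slice_from c (a := a) (by omega)]
  exact List.drop_eq_nil_of_le (by omega)

theorem floordiv_pow2 (m : Nat) : PySem.Int.floordiv ((2:Int)^(m+1)) 2 = 2^m := by
  rw [PySem.Int.floordiv_eq_ediv_of_pos (by omega), pow_succ]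
  exact Int.mul_ediv_cancel _ (by omega)

theorem two_le_pow2 (m : Nat) : (2:Int) ≤ 2^(m+1) := by
  have : (1:Int) ≤ 2^m := one_le_pow₀ (by omega)
  calc (2:Int) = 2*1 := by ring
    _ ≤ 2*2^m := by linarith
    _ = 2^(m+1) := by ring

theorem arrange_step (c : List Int) (t : Int) (h : ¬ t < 2) :
    arrangeAlt c t =
      arrangeAlt (PySem.List.slice (PySem.List.slice c none (some t)) (some (-(PySem.Int.floordiv t 2))) none ++
        PySem.List.slice (PySem.List.slice c none (some t)) none (some (-(PySem.Int.floordiv t 2))) ++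
        PySem.List.slice c (some t) none) (PySem.Int.floordiv t 2) := by
  rw [arrangeAlt]
  simp [h]

theorem arrange_one (c : List Int) (t : Int) (h : t < 2) : arrangeAlt c t = c := by
  rw [arrangeAlt]; simp [h]

-- A's loop, started at i = k+2-m with top = 2^m, computes exactly B's halving recursion.
theorem loopA (k : Int) : ∀ (m : Nat) (c : List Int), (m : Int) ≤ k →
    ((PySem.List.pyRange (k + 2 - m) (k + 2) 1).foldl (stepA k) (c, (2:Int)^m)).1
      = arrangeAlt c ((2:Int)^m)
  | 0, c, h => by
      rw [PySem.List.pyRange_one_eq_nil (by push_cast; omega)]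
      rw [arrange_one _ _ (by norm_num)]
      rfl
  | (m+1), c, h => by
      rw [PySem.List.pyRange_one_cons (by push_cast; omega)]
      rw [List.foldl_cons]
      have hc : (k + 2 - ((m:Int)+1)) + 1 = k + 2 - (m:Int) := by ring
      have hmove : (k - (k + 2 - (((m:Nat)+1:Nat):Int)) + 1).toNat = m := by push_cast; omega
      simp only [stepA, hmove]
      push_cast at hc ⊢
      rw [hc]
      rw [loopA k m _ (by omega)]
      rw [arrange_step c ((2:Int)^(m+1)) (by have := two_le_pow2 m; omega)]
      rw [floordiv_pow2]

-- rotations whose shift is at least the list length are identities, so the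
-- recursion may start at any smaller power of two that still bounds the length
theorem skip : ∀ (m j : Nat) (c : List Int), j ≤ m → (c.length : Int) ≤ 2^j →
    arrangeAlt c ((2:Int)^m) = arrangeAlt c ((2:Int)^j)
  | 0, j, c, hj, hl => by
      interval_cases j
      rfl
  | (m+1), j, c, hj, hl => by
      rcases Nat.lt_or_ge j (m+1) with hlt | hge
      · have hjm : j ≤ m := by omega
        have hpow : (2:Int)^j ≤ 2^m := pow_le_pow_right₀ (by omega) hjm
        have hlen : (c.length : Int) ≤ 2^m := le_trans hl hpow
        rw [arrange_step c ((2:Int)^(m+1)) (by have := two_le_pow2 m; omega)]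
        rw [floordiv_pow2]
        rw [take_all_slice c _ (by have := two_le_pow2 m; omega : (c.length:Int) ≤ 2^(m+1))]
        rw [rot_id c _ hlen]
        rw [drop_all_slice c _ (by have := two_le_pow2 m; omega : (c.length:Int) ≤ 2^(m+1))]
        rw [List.append_nil]
        exact skip m j c hjm hl
      · have : j = m+1 := by omega
        subst this
        rfl

theorem main_eq (card : List Int) (k : Int) (n : Int) (hk : 0 ≤ k) :
    calc_py card k n = calc_py_alt card k n := by
  unfold calc_py calc_py_alt
  set top := (2 : Int) ^ k.toNat with htop
  set c0 := PySem.List.slice card (some (-top)) none ++ PySem.List.slice card none (some (-top)) with hc0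
  show ((PySem.List.pyRange 2 (k + 2) 1).foldl (stepA k) (c0, top)).1 =
    arrangeAlt c0 (if ((c0.length : Int)) ≠ 0 then
      (2:Int) ^ (min k ((PySem.Int.bitLength (2 * (c0.length : Int) - 1) : Int) - 1)).toNat else top)
  have hl := loopA k k.toNat c0 (by omega)
  rw [show k + 2 - ((k.toNat : Int)) = 2 from by omega] at hl
  rw [hl]
  by_cases hL : ((c0.length : Int) : Int) ≠ 0
  · rw [if_pos hL]
    set bl := PySem.Int.bitLength (2 * (c0.length : Int) - 1) with hbl
    have hb := PySem.Int.lt_two_pow_bitLength (2 * (c0.length : Int) - 1)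
    rw [← hbl] at hb
    have hLn : 1 ≤ c0.length := by omega
    have hblpos : 1 ≤ bl := by
      by_contra hb0
      have : bl = 0 := by omega
      rw [this] at hb
      simp at hb
      omega
    rcases le_or_gt k ((bl : Int) - 1) with hk1 | hk2
    · rw [min_eq_left hk1]
    · rw [min_eq_right (le_of_lt hk2)]
      have he : ((bl : Int) - 1).toNat = bl - 1 := by omega
      rw [he]
      have hlen : ((c0.length : Int)) ≤ (2:Int) ^ (bl - 1) := by
        have h1 : (2 * (c0.length : Int) - 1).natAbs = 2 * c0.length - 1 := by omega
        rw [h1] at hb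
        have h2 : 2 ^ bl = 2 * 2 ^ (bl - 1) := by
          rw [← pow_succ']
          congr 1
          omega
        rw [h2] at hb
        have h3 : c0.length ≤ 2 ^ (bl - 1) := by omega
        exact_mod_cast h3
      exact skip k.toNat (bl - 1) c0 (by omega) hlen
  · rw [if_neg hL]

-- ===== VERDICT (by name: the statement is the Claim_ definition above) =====
theorem calc_py_spec : Claim_equal_calc_py := by
  intro card k n _ hpre
  exact main_eq card k n hpre
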